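-- pv_equiv track=rewrite | github.com/Sachin-kumar-m/DSA-Practice | interview Problems/evenIndices.py | evenIndexSum
-- ===== SOURCE A (Python) =====
-- def evenIndexSum(A,Q):
--     prefixArray = [0]*len(A)
--     prefixArray[0] = A[0]
--
--     for i in range(1,len(A)):
--         if i%2==0: #if index is even then only i add my current index value
--             prefixArray[i] = prefixArray[i-1]+A[i]
--         else: #if not i will keep the previous value
--             prefixArray[i] = prefixArray[i-1]
--
--     ans = [0]*len(Q)
--
--     #here is simple range sum technique
--     for i in range(len(Q)):
--         s = Q[i][0]
--         e = Q[i][1]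
--         if s==0:
--             ans[i] = prefixArray[e]
--         else:
--             ans[i] = prefixArray[e]-prefixArray[s-1]
--     return ans
-- ===== SOURCE B (Python) =====
-- def evenIndexSum(A, Q):
--     def upto(i):
--         # sum of the even-indexed elements among A[0..i]
--         return sum(A[j] for j in range(i + 1) if j % 2 == 0)
--     return [upto(e) - upto(s - 1) for s, e in Q]
-- ===== Notes on version B (the rewrite author's own statement) =====
-- stated objective: simpler
-- what changed: Drops the precomputed prefix table and both index-assignment loops; each query is the difference of two on-demand even-index prefix sums. Pre_ restricts queries to in-range non-negative positions 0 <= s <= len(A), 0 <= e < len(A) — the natural domain of range-sum queries; queries with negative positions lie outside that domain and no behaviour is specified for them, so A's reading (Python's negative-index convention) and B's (an empty prefix below position 0) are two defensible choices that need not agree.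
-- outside the precondition, e.g. on evenIndexSum([1, 2, 3], [(-1, -1)]): A returns [3], B returns [0]
import Mathlib
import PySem

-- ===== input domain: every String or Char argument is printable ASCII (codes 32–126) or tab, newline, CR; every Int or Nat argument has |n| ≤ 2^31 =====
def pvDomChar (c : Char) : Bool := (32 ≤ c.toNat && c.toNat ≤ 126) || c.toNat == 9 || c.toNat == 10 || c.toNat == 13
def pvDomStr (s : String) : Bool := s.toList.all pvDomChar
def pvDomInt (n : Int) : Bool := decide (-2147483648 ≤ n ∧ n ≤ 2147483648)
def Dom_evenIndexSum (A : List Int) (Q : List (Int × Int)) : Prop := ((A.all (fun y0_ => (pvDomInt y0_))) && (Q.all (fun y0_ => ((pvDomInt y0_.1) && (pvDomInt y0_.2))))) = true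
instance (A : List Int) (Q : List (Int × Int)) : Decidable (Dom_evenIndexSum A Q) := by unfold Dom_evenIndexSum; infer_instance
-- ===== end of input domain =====

-- B drops A's precomputed prefix table and index-assignment loops: each query is the
-- difference of two on-demand even-index prefix sums (simpler decomposition, not faster).


-- ===== PORT A =====
def evenIndexSum (A : List Int) (Q : List (Int × Int)) : List Int :=
  let prefixArray : List Int := List.replicate A.length 0
  let prefixArray := PySem.List.pySetD prefixArray 0 (PySem.List.pyGetD A 0 0)
  let prefixArray := (PySem.List.pyRange 1 (PySem.List.len A) 1).foldl (fun p i =>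
      if PySem.Int.mod i 2 == 0 then
        PySem.List.pySetD p i (PySem.List.pyGetD p (i - 1) 0 + PySem.List.pyGetD A i 0)
      else
        PySem.List.pySetD p i (PySem.List.pyGetD p (i - 1) 0)) prefixArray
  let ans : List Int := List.replicate Q.length 0
  (PySem.List.pyRange 0 (PySem.List.len Q) 1).foldl (fun ans i =>
      let s := (PySem.List.pyGetD Q i (0, 0)).1
      let e := (PySem.List.pyGetD Q i (0, 0)).2
      if s == 0 then
        PySem.List.pySetD ans i (PySem.List.pyGetD prefixArray e 0)
      else
        PySem.List.pySetD ans i (PySem.List.pyGetD prefixArray e 0 - PySem.List.pyGetD prefixArray (s - 1) 0)) ans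

-- ===== PORT B =====
-- Source B's helper upto(i): sum of the even-indexed elements among A[0..i]
def upto (A : List Int) (i : Int) : Int :=
  (PySem.List.pyRange 0 (i + 1) 1).foldl
    (fun acc j => if PySem.Int.mod j 2 == 0 then acc + PySem.List.pyGetD A j 0 else acc) 0

def evenIndexSum_alt (A : List Int) (Q : List (Int × Int)) : List Int :=
  Q.map (fun q => upto A q.2 - upto A (q.1 - 1))

-- ===== PRECONDITION & SPEC =====
-- Pre_ restricts inputs to the task's natural domain: A non-empty (A[0] raises IndexError on
-- []) and every query (s, e) an in-range pair of non-negative positions, 0 ≤ s ≤ len(A) and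
-- 0 ≤ e < len(A) (beyond these bounds A raises IndexError). Queries with negative positions
-- lie outside that domain and no behaviour is specified for them: A reads them by Python's
-- negative-index convention, B as an empty prefix below position 0 — two defensible choices
-- on unspecified input that need not agree, so Pre_ excludes them.
def Pre_evenIndexSum (A : List Int) (Q : List (Int × Int)) : Prop :=
  A ≠ [] ∧ ∀ q ∈ Q, 0 ≤ q.1 ∧ q.1 ≤ (A.length : Int) ∧ 0 ≤ q.2 ∧ q.2 < (A.length : Int)
instance (A : List Int) (Q : List (Int × Int)) : Decidable (Pre_evenIndexSum A Q) := by unfold Pre_evenIndexSum; infer_instance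

def pvWitness_evenIndexSum : List Int × (List (Int × Int)) := ([1, 2, 3], [(0, 2), (1, 2), (2, 2)])

def Spec_evenIndexSum (A : List Int) (Q : List (Int × Int)) (out : List Int) : Prop := out = evenIndexSum_alt A Q
instance (A : List Int) (Q : List (Int × Int)) (out : List Int) : Decidable (Spec_evenIndexSum A Q out) := by unfold Spec_evenIndexSum; infer_instance

-- ===== CLAIM (what is proved, stated in full; the proofs are below) =====
def Claim_equal_evenIndexSum : Prop := ∀ (A : List Int) (Q : List (Int × Int)), Dom_evenIndexSum A Q → Pre_evenIndexSum A Q → Spec_evenIndexSum A Q (evenIndexSum A Q)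

-- ===== LEMMAS AND PROOFS =====

-- running even-index sum: esum A k = sum of A[j] for 0 ≤ j ≤ k with j even
def esum (A : List Int) : Nat → Int
  | 0 => PySem.List.pyGetD A 0 0
  | k + 1 => if (k + 1) % 2 = 0 then esum A k + PySem.List.pyGetD A (k + 1) 0 else esum A k

-- A's per-query value computed from the finished prefix array
def aval (pre : List Int) (q : Int × Int) : Int :=
  if q.1 == 0 then PySem.List.pyGetD pre q.2 0
  else PySem.List.pyGetD pre q.2 0 - PySem.List.pyGetD pre (q.1 - 1) 0

-- B's inner fold computes a difference of running even-index sums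
theorem bsum_eq (A : List Int) (s : Nat) : ∀ (e : Nat), s ≤ e →
    (PySem.List.pyRange (s : Int) ((e : Int) + 1) 1).foldl
      (fun acc j => if PySem.Int.mod j 2 == 0 then acc + PySem.List.pyGetD A j 0 else acc) 0
    = esum A e - (if s = 0 then 0 else esum A (s - 1)) := by
  intro e
  induction e with
  | zero =>
    intro hs
    have h0 : s = 0 := Nat.le_zero.mp hs
    subst h0
    rw [show ((0:Nat):Int) + 1 = ((0:Nat):Int) + 1 by ring, PySem.List.pyRange_one_singleton]
    simp [esum, PySem.Int.mod]
  | succ e ih =>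
    intro hs
    have hm : PySem.Int.mod (((e+1:Nat)) : Int) 2 = (((e + 1) % 2 : Nat) : Int) :=
      PySem.Int.mod_natCast (e + 1) 2
    by_cases he : s = e + 1
    · subst he
      rw [PySem.List.pyRange_one_singleton]
      simp only [List.foldl_cons, List.foldl_nil, hm]
      by_cases hp : (e + 1) % 2 = 0
      · simp [hp, esum]
      · simp [esum, Nat.mod_two_ne_zero.mp hp]
    · have hse : s ≤ e := by omega
      have hcast : ((e + 1 : Nat) : Int) + 1 = ((e : Int) + 1) + 1 := by push_cast; ring
      rw [hcast, PySem.List.pyRange_one_succ_right (by exact_mod_cast Nat.le_succ_of_le hse),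
        List.foldl_append, ih hse]
      simp only [List.foldl_cons, List.foldl_nil]
      rw [show ((e : Int) + 1) = ((e + 1 : Nat) : Int) by push_cast; ring, hm]
      by_cases hp : (e + 1) % 2 = 0
      · simp [hp, esum]; ring
      · have h1 : (e + 1) % 2 = 1 := Nat.mod_two_ne_zero.mp hp
        simp [h1, esum]

-- invariant of A's prefix-array loop: after processing indices < m it holds esum on them,
-- and running it from m to len(A) extends that to every index
theorem prefix_inv (A : List Int) : ∀ (m : Nat) (p : List Int), 1 ≤ m → p.length = A.length →
    (∀ k, k < m → k < A.length → PySem.List.pyGetD p (k : Int) 0 = esum A k) →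
    ((PySem.List.pyRange (m : Int) (A.length : Int) 1).foldl (fun p i =>
      if PySem.Int.mod i 2 == 0 then
        PySem.List.pySetD p i (PySem.List.pyGetD p (i - 1) 0 + PySem.List.pyGetD A i 0)
      else
        PySem.List.pySetD p i (PySem.List.pyGetD p (i - 1) 0)) p).length = A.length ∧
    ∀ k, k < A.length → PySem.List.pyGetD
      ((PySem.List.pyRange (m : Int) (A.length : Int) 1).foldl (fun p i =>
      if PySem.Int.mod i 2 == 0 then
        PySem.List.pySetD p i (PySem.List.pyGetD p (i - 1) 0 + PySem.List.pyGetD A i 0)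
      else
        PySem.List.pySetD p i (PySem.List.pyGetD p (i - 1) 0)) p) (k : Int) 0 = esum A k := by
  intro m p hm hlen h
  by_cases hcase : m < A.length
  · rw [PySem.List.pyRange_one_cons (by exact_mod_cast hcase)]
    rw [List.foldl_cons]
    rw [show ((m : Int) + 1) = ((m + 1 : Nat) : Int) by push_cast; ring]
    have hmod : PySem.Int.mod ((m : Nat) : Int) 2 = ((m % 2 : Nat) : Int) := PySem.Int.mod_natCast m 2
    have hsub : ((m : Int) - 1) = ((m - 1 : Nat) : Int) := by omega
    have hprev : PySem.List.pyGetD p ((m : Int) - 1) 0 = esum A (m - 1) := by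
      rw [hsub]; exact h (m - 1) (by omega) (by omega)
    have key : ∀ v, (PySem.List.pySetD p ((m:Nat) : Int) v).length = A.length ∧
        ∀ k, k < m + 1 → k < A.length →
          PySem.List.pyGetD (PySem.List.pySetD p ((m:Nat) : Int) v) (k : Int) 0 =
            (if k = m then v else esum A k) := by
      intro v
      constructor
      · rw [PySem.List.pySetD_natCast]; simp [hlen]
      · intro k hk hkA
        rw [PySem.List.pyGetD_pySetD_natCast p m k v 0 (by omega)]
        by_cases hkm : k = m
        · simp [hkm]
        · simp [hkm, h k (by omega) hkA]
    have hval : (if PySem.Int.mod ((m : Nat) : Int) 2 == 0 then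
        PySem.List.pySetD p ((m:Nat):Int) (PySem.List.pyGetD p ((m:Int) - 1) 0 + PySem.List.pyGetD A ((m:Nat):Int) 0)
      else PySem.List.pySetD p ((m:Nat):Int) (PySem.List.pyGetD p ((m:Int) - 1) 0)) =
        PySem.List.pySetD p ((m:Nat):Int) (esum A m) := by
      have hm1 : (m - 1) + 1 = m := by omega
      have hesum : esum A m = if m % 2 = 0 then esum A (m - 1) + PySem.List.pyGetD A ((m:Nat):Int) 0 else esum A (m - 1) := by
        conv_lhs => rw [← hm1]
        rw [esum, hm1, show ((m - 1 : Nat) : Int) + 1 = ((m : Nat) : Int) by omega]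
      rw [hprev, hmod, hesum]
      by_cases hp : m % 2 = 0
      · simp [hp]
      · have h1 : m % 2 = 1 := Nat.mod_two_ne_zero.mp hp
        simp [h1]
    rw [hval]
    have ⟨hl2, hc2⟩ := key (esum A m)
    refine prefix_inv A (m + 1) _ (by omega) hl2 ?_
    intro k hk hkA
    rw [hc2 k hk hkA]
    by_cases hkm : k = m <;> simp [hkm]
  · rw [PySem.List.pyRange_one_eq_nil (by exact_mod_cast Nat.le_of_not_lt hcase)]
    simp only [List.foldl_nil]
    exact ⟨hlen, fun k hk => h k (by omega) hk⟩
termination_by m => A.length - m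

-- invariant of A's answer loop: it fills slot k with aval of query k
theorem ans_inv (Q : List (Int × Int)) (pre : List Int) : ∀ (m : Nat) (ans : List Int),
    ans.length = Q.length →
    (∀ k, k < m → k < Q.length → PySem.List.pyGetD ans (k : Int) 0 = aval pre (Q.getD k (0, 0))) →
    ((PySem.List.pyRange (m : Int) (Q.length : Int) 1).foldl (fun ans i =>
      let s := (PySem.List.pyGetD Q i (0, 0)).1
      let e := (PySem.List.pyGetD Q i (0, 0)).2
      if s == 0 then PySem.List.pySetD ans i (PySem.List.pyGetD pre e 0)
      else PySem.List.pySetD ans i (PySem.List.pyGetD pre e 0 - PySem.List.pyGetD pre (s - 1) 0)) ans).length = Q.length ∧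
    ∀ k, k < Q.length → PySem.List.pyGetD
      ((PySem.List.pyRange (m : Int) (Q.length : Int) 1).foldl (fun ans i =>
      let s := (PySem.List.pyGetD Q i (0, 0)).1
      let e := (PySem.List.pyGetD Q i (0, 0)).2
      if s == 0 then PySem.List.pySetD ans i (PySem.List.pyGetD pre e 0)
      else PySem.List.pySetD ans i (PySem.List.pyGetD pre e 0 - PySem.List.pyGetD pre (s - 1) 0)) ans) (k : Int) 0
      = aval pre (Q.getD k (0, 0)) := by
  intro m ans hlen h
  by_cases hcase : m < Q.length
  · rw [PySem.List.pyRange_one_cons (by exact_mod_cast hcase)]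
    rw [List.foldl_cons]
    rw [show ((m : Int) + 1) = ((m + 1 : Nat) : Int) by push_cast; ring]
    have hbody :
        (let s := (PySem.List.pyGetD Q ((m : Nat) : Int) (0, 0)).1
         let e := (PySem.List.pyGetD Q ((m : Nat) : Int) (0, 0)).2
         if s == 0 then PySem.List.pySetD ans ((m : Nat) : Int) (PySem.List.pyGetD pre e 0)
         else PySem.List.pySetD ans ((m : Nat) : Int) (PySem.List.pyGetD pre e 0 - PySem.List.pyGetD pre (s - 1) 0))
        = PySem.List.pySetD ans ((m : Nat) : Int) (aval pre (Q.getD m (0, 0))) := by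
      simp only [aval, PySem.List.pyGetD_natCast, PySem.List.pySetD_natCast, beq_iff_eq]
      exact (apply_ite (fun v => ans.set m v) _ _ _).symm
    rw [hbody]
    refine ans_inv Q pre (m + 1) _ (by rw [PySem.List.pySetD_natCast]; simp [hlen]) ?_
    intro k hk hkQ
    rw [PySem.List.pyGetD_pySetD_natCast ans m k _ 0 (by omega)]
    by_cases hkm : k = m
    · simp [hkm]
    · simp [hkm, h k (by omega) hkQ]
  · rw [PySem.List.pyRange_one_eq_nil (by exact_mod_cast Nat.le_of_not_lt hcase)]
    simp only [List.foldl_nil]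
    exact ⟨hlen, fun k hk => h k (by omega) hk⟩
termination_by m => Q.length - m

theorem query_eq (A : List Int) (pre : List Int)
    (hprelen : pre.length = A.length)
    (hprechar : ∀ k, k < A.length → PySem.List.pyGetD pre (k : Int) 0 = esum A k)
    (s e : Int) (hs1 : 0 ≤ s) (hs2 : s ≤ (A.length : Int))
    (he1 : 0 ≤ e) (he2 : e < (A.length : Int)) :
    aval pre (s, e) = upto A e - upto A (s - 1) := by
  have hpreG : ∀ m, m < A.length → pre.getD m 0 = esum A m := by
    intro m hm
    have h2 := hprechar m hm
    rwa [PySem.List.pyGetD_natCast] at h2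
  have hE : PySem.List.pyGetD pre e 0 = esum A e.toNat := by
    rw [show e = ((e.toNat : Nat) : Int) by omega, PySem.List.pyGetD_natCast]
    exact hpreG _ (by omega)
  have hupE : upto A e = esum A e.toNat := by
    rw [upto, show e + 1 = ((e.toNat : Nat) : Int) + 1 by omega]
    have hb := bsum_eq A 0 e.toNat (Nat.zero_le _)
    simp only [Nat.cast_zero, if_pos] at hb
    rw [hb]; simp
  by_cases hs0 : s = 0
  · rw [aval, if_pos (by simp [hs0] : (((s, e)).1 == 0) = true)]
    have h0 : upto A (s - 1) = 0 := by
      rw [upto, hs0, PySem.List.pyRange_one_eq_nil (by omega)]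
      simp
    simp only
    rw [hE, hupE, h0]
    ring
  · have hS1 : PySem.List.pyGetD pre (s - 1) 0 = esum A (s.toNat - 1) := by
      rw [show s - 1 = ((s.toNat - 1 : Nat) : Int) by omega, PySem.List.pyGetD_natCast]
      exact hpreG _ (by omega)
    have hupS : upto A (s - 1) = esum A (s.toNat - 1) := by
      rw [upto, show s - 1 + 1 = ((s.toNat - 1 : Nat) : Int) + 1 by omega]
      have hb := bsum_eq A 0 (s.toNat - 1) (Nat.zero_le _)
      simp only [Nat.cast_zero, if_pos] at hb
      rw [hb]; simp
    rw [aval, if_neg (by simp [hs0] : ¬ ((((s, e)).1 == 0) = true))]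
    simp only
    rw [hE, hS1, hupE, hupS]

theorem main_thm (A : List Int) (Q : List (Int × Int))
    (hA : A ≠ [])
    (hQ : ∀ q ∈ Q, 0 ≤ q.1 ∧ q.1 ≤ (A.length : Int) ∧ 0 ≤ q.2 ∧ q.2 < (A.length : Int)) :
    evenIndexSum A Q = evenIndexSum_alt A Q := by
  have hn : 0 < A.length := List.length_pos_of_ne_nil hA
  have hp1len : (PySem.List.pySetD (List.replicate A.length (0:Int)) 0 (PySem.List.pyGetD A 0 0)).length = A.length := by
    rw [show (0:Int) = ((0:Nat):Int) by norm_num, PySem.List.pySetD_natCast]; simp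
  have hp1get : ∀ k, k < 1 → k < A.length →
      PySem.List.pyGetD (PySem.List.pySetD (List.replicate A.length (0:Int)) 0 (PySem.List.pyGetD A 0 0)) (k : Int) 0 = esum A k := by
    intro k hk _
    interval_cases k
    rw [show (0:Int) = ((0:Nat):Int) by norm_num, PySem.List.pySetD_natCast, PySem.List.pyGetD_natCast]
    simp [List.getD, esum, hn]
  have hpre := prefix_inv A 1
    (PySem.List.pySetD (List.replicate A.length (0:Int)) 0 (PySem.List.pyGetD A 0 0))
    (le_refl 1) hp1len hp1get
  set pre := (PySem.List.pyRange ((1:Nat) : Int) (A.length : Int) 1).foldl (fun p i =>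
      if PySem.Int.mod i 2 == 0 then
        PySem.List.pySetD p i (PySem.List.pyGetD p (i - 1) 0 + PySem.List.pyGetD A i 0)
      else
        PySem.List.pySetD p i (PySem.List.pyGetD p (i - 1) 0))
    (PySem.List.pySetD (List.replicate A.length (0:Int)) 0 (PySem.List.pyGetD A 0 0)) with hpredef
  obtain ⟨hprelen, hprechar⟩ := hpre
  obtain ⟨hanslen, hanschar⟩ := ans_inv Q pre 0 (List.replicate Q.length (0:Int)) (by simp) (by omega)
  have hport : evenIndexSum A Q =
      (PySem.List.pyRange ((0:Nat) : Int) (Q.length : Int) 1).foldl (fun ans i =>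
        let s := (PySem.List.pyGetD Q i (0, 0)).1
        let e := (PySem.List.pyGetD Q i (0, 0)).2
        if s == 0 then PySem.List.pySetD ans i (PySem.List.pyGetD pre e 0)
        else PySem.List.pySetD ans i (PySem.List.pyGetD pre e 0 - PySem.List.pyGetD pre (s - 1) 0))
      (List.replicate Q.length (0:Int)) := by
    rw [evenIndexSum, hpredef]
    norm_num [PySem.List.len_eq]
  rw [hport, evenIndexSum_alt]
  apply List.ext_getElem
  · rw [hanslen, List.length_map]
  · intro k hk1 hk2
    have hkQ : k < Q.length := by simpa using hk2
    have hget := hanschar k hkQ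
    rw [PySem.List.pyGetD_natCast] at hget
    rw [List.getD_eq_getElem?_getD, List.getElem?_eq_getElem hk1, Option.getD_some] at hget
    rw [hget, List.getElem_map]
    obtain ⟨h1, h2, h3, h4⟩ := hQ (Q[k]) (List.getElem_mem hkQ)
    have hQgetD : Q.getD k (0, 0) = Q[k] := by
      rw [List.getD_eq_getElem?_getD, List.getElem?_eq_getElem hkQ, Option.getD_some]
    rw [hQgetD, show Q[k] = (Q[k].1, Q[k].2) from rfl]
    exact query_eq A pre hprelen hprechar Q[k].1 Q[k].2 h1 h2 h3 h4

-- ===== VERDICT (by name: the statement is the Claim_ definition above) =====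
theorem evenIndexSum_spec : Claim_equal_evenIndexSum := by
  intro A Q _ hpre
  unfold Spec_evenIndexSum
  exact main_thm A Q hpre.1 hpre.2
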